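-- pv_equiv track=rewrite | github.com/headoftheport/python-problems | String/unique_email_addresses.py | num_unique_email
-- ===== SOURCE A (Python) =====
-- def num_unique_email(emails) -> int:
--     """
--     string search
--     time complexity : O(sum(len of emailIds in string))
--     space complexity: O(unique email Ids)
--     """
--     mails = set()
--
--
--     for email in emails:
--         string = ''
--         index = 0
--         ignore = False
--         while index < len(email) and email[index] != '@':
--             if ignore or email[index] == '.':
--                 index = index + 1
--                 continue
--             if email[index] == '+':
--                 ignore = True
--             else:
--                 string += email[index]
--             index = index + 1
--
--
--         mails.add(string + email[index:len(email)])
--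
--     return len(mails)
-- ===== SOURCE B (Python) =====
-- def num_unique_email(emails) -> int:
--     mails = set()
--     for email in emails:
--         at = email.find('@')
--         if at == -1:
--             at = len(email)
--         local = email[:at].split('+', 1)[0].replace('.', '')
--         mails.add(local + email[at:])
--     return len(mails)
-- ===== Notes on version B (the rewrite author's own statement) =====
-- stated objective: idiomatic
-- what changed: Replaces A's index-based while loop with a stateful ignore flag by the standard str.find/slice/split/replace pipeline: local part = email[:at].split('+',1)[0].replace('.',''), tail = email[at:], same set-based dedup; the C-level string methods also make it measurably faster.
import Mathlib
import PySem

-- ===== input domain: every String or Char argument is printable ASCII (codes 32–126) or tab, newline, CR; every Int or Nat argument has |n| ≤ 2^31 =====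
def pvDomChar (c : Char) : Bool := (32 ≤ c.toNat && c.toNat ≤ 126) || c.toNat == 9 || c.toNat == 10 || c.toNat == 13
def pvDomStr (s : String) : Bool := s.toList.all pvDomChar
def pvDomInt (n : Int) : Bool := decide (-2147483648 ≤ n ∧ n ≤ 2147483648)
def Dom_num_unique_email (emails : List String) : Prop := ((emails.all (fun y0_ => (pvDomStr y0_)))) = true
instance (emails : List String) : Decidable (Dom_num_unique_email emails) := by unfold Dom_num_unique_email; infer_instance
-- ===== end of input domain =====

-- B replaces A's index-based while loop (with an 'ignore' flag) by the idiomatic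
-- find/slice/split/replace pipeline; same set-based dedup, same cost.

-- ===== PORT A =====
-- A's inner while loop: scans chars until '@' or end, skipping '.' and everything
-- after '+'; when it stops it appends email[index:] (the part from '@' on).
def canonAGo : List Char → Bool → List Char
  | [], _ => []
  | c :: cs, ignore =>
    if c = '@' then c :: cs
    else if ignore ∨ c = '.' then canonAGo cs ignore
    else if c = '+' then canonAGo cs true
    else c :: canonAGo cs ignore

def num_unique_email (emails : List String) : Int :=
  PySem.Set.len
    (emails.foldl (fun mails email =>
      PySem.Set.add mails (String.ofList (canonAGo email.toList false))) PySem.Set.empty)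

-- ===== PORT B =====
-- Source B: at = email.find('@'); if at == -1: at = len(email);
-- local = email[:at].split('+', 1)[0].replace('.', ''); add local + email[at:].
-- (split('+',1) always yields a nonempty list, so [0] is ported as headD [].)
def canonB (email : String) : String :=
  let cs := email.toList
  let at0 := PySem.Chars.find cs ['@']
  let at1 := if at0 = -1 then PySem.Chars.len cs else at0
  let localPart :=
    PySem.Chars.replace
      ((PySem.Chars.splitOnMax (PySem.Chars.slice cs none (some at1)) ['+'] 1).headD [])
      ['.'] []
  String.ofList (localPart ++ PySem.Chars.slice cs (some at1) none)

def num_unique_email_alt (emails : List String) : Int :=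
  PySem.Set.len
    (emails.foldl (fun mails email => PySem.Set.add mails (canonB email)) PySem.Set.empty)

-- ===== PRECONDITION & SPEC =====
def Spec_num_unique_email (emails : List String) (out : Int) : Prop := out = num_unique_email_alt emails
instance (emails : List String) (out : Int) : Decidable (Spec_num_unique_email emails out) := by unfold Spec_num_unique_email; infer_instance

-- ===== CLAIM (what is proved, stated in full; the proofs are below) =====
def Claim_equal_num_unique_email : Prop := ∀ (emails : List String), Dom_num_unique_email emails → Spec_num_unique_email emails (num_unique_email emails)

-- ===== LEMMAS AND PROOFS =====

-- A's scan in closed form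
theorem canonAGo_true (cs : List Char) :
    canonAGo cs true = cs.dropWhile (· ≠ '@') := by
  induction cs with
  | nil => rfl
  | cons c cs ih =>
    by_cases h : c = '@' <;> simp [canonAGo, h, ih]

theorem canonAGo_false (cs : List Char) :
    canonAGo cs false =
      ((cs.takeWhile (· ≠ '@')).takeWhile (· ≠ '+')).filter (· ≠ '.')
        ++ cs.dropWhile (· ≠ '@') := by
  induction cs with
  | nil => rfl
  | cons c cs ih =>
    by_cases ha : c = '@'
    · simp [canonAGo, ha]
    · by_cases hd : c = '.'
      · simp [canonAGo, hd, ih]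
      · by_cases hp : c = '+'
        · simp [canonAGo, hp, canonAGo_true]
        · simp [canonAGo, ha, hd, hp, ih]

-- str.find with a single-character needle
theorem find_go_single (a : Char) (l : List Char) (k : Nat) :
    PySem.Chars.find.go [a] l k =
      if a ∈ l then ((k : Int) + ((l.takeWhile (· ≠ a)).length : Int)) else -1 := by
  induction l generalizing k with
  | nil => simp [PySem.Chars.find.go]
  | cons c cs ih =>
    by_cases h : c = a
    · simp [PySem.Chars.find.go, List.isPrefixOf, h]
    · have hne : ¬ (a == c) = true := by simp; exact fun e => h e.symm
      simp [PySem.Chars.find.go, List.isPrefixOf, hne, h, ih, Ne.symm h]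
      by_cases hm : a ∈ cs <;> simp [hm]
      ring

theorem find_single (a : Char) (l : List Char) :
    PySem.Chars.find l [a] =
      if a ∈ l then ((l.takeWhile (· ≠ a)).length : Int) else -1 := by
  simp [PySem.Chars.find, find_go_single]

-- s.replace('.', '') is a filter
theorem replace_go_del (fuel : Nat) (l acc : List Char) (h : l.length ≤ fuel) :
    PySem.Chars.replace.go ['.'] [] fuel l acc =
      acc.reverse ++ l.filter (· ≠ '.') := by
  induction fuel generalizing l acc with
  | zero =>
    have : l = [] := by cases l <;> simp_all
    simp [this, PySem.Chars.replace.go]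
  | succ n ih =>
    cases l with
    | nil => simp [PySem.Chars.replace.go]
    | cons c cs =>
      by_cases hc : c = '.'
      · simp [PySem.Chars.replace.go, List.isPrefixOf, hc, ih cs acc (by simpa using h)]
      · have : ¬ ('.' == c) = true := by simpa using fun e => hc e.symm
        simp [PySem.Chars.replace.go, List.isPrefixOf, this, hc,
          ih cs (c :: acc) (by simpa using Nat.le_of_succ_le_succ h)]

theorem replace_del (l : List Char) :
    PySem.Chars.replace l ['.'] [] = l.filter (· ≠ '.') := by
  simp [PySem.Chars.replace, replace_go_del l.length l [] le_rfl]

-- s.split('+', 1)[0] is takeWhile (· ≠ '+')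
theorem splitOnMax_go_zero (fuel : Nat) (l cur acc : List Char) (accs : List (List Char)) :
    ∃ x, PySem.Chars.splitOnMax.go ['+'] fuel 0 l cur (acc :: accs) = (x :: acc :: accs).reverse := by
  cases fuel with
  | zero => exact ⟨_, rfl⟩
  | succ n => cases l with
    | nil => exact ⟨_, rfl⟩
    | cons c cs => exact ⟨cur.reverse ++ c :: cs, by simp [PySem.Chars.splitOnMax.go]⟩

theorem splitOnMax_go_one (fuel : Nat) (l cur : List Char) (h : l.length ≤ fuel) :
    (PySem.Chars.splitOnMax.go ['+'] fuel 1 l cur []).headD [] =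
      cur.reverse ++ l.takeWhile (· ≠ '+') := by
  induction fuel generalizing l cur with
  | zero =>
    have : l = [] := by cases l <;> simp_all
    simp [this, PySem.Chars.splitOnMax.go]
  | succ n ih =>
    cases l with
    | nil => simp [PySem.Chars.splitOnMax.go]
    | cons c cs =>
      by_cases hc : c = '+'
      · obtain ⟨x, hx⟩ := splitOnMax_go_zero n cs [] cur.reverse []
        simp [PySem.Chars.splitOnMax.go, hc, hx]
      · have hb : ¬ ('+' == c) = true := by simpa using fun e => hc e.symm
        rw [show PySem.Chars.splitOnMax.go ['+'] (n+1) 1 (c :: cs) cur [] =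
              PySem.Chars.splitOnMax.go ['+'] n 1 cs (c :: cur) [] from by
            simp [PySem.Chars.splitOnMax.go, List.isPrefixOf, hb]]
        rw [ih cs (c :: cur) (by simpa using Nat.le_of_succ_le_succ h)]
        simp [hc]

theorem splitOnMax_one_head (l : List Char) :
    (PySem.Chars.splitOnMax l ['+'] 1).headD [] = l.takeWhile (· ≠ '+') := by
  have h1 : PySem.Chars.splitOnMax l ['+'] 1 =
      PySem.Chars.splitOnMax.go ['+'] (l.length + 1) 1 l [] [] := by
    norm_num [PySem.Chars.splitOnMax]
  rw [h1, splitOnMax_go_one (l.length + 1) l [] (by omega)]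
  simp

-- the two canonicalisations agree on every email
theorem drop_length_takeWhile (l : List Char) (p : Char → Bool) :
    l.drop (l.takeWhile p).length = l.dropWhile p := by
  induction l with
  | nil => rfl
  | cons c cs ih =>
    by_cases h : p c <;> simp [h, ih]

theorem canon_eq (e : String) :
    String.ofList (canonAGo e.toList false) = canonB e := by
  rw [canonAGo_false]
  simp only [canonB]
  by_cases hm : '@' ∈ e.toList
  · have hfind : PySem.Chars.find e.toList ['@'] =
        (((e.toList.takeWhile (· ≠ '@')).length : Nat) : Int) := by
      rw [find_single]; simp [hm]
    have hne : ¬ ((((e.toList.takeWhile (· ≠ '@')).length : Nat) : Int) = -1) := by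
      omega
    have htake : e.toList.take (e.toList.takeWhile (· ≠ '@')).length =
        e.toList.takeWhile (· ≠ '@') :=
      (List.prefix_iff_eq_take.mp (List.takeWhile_prefix _)).symm
    rw [hfind, if_neg hne, PySem.Chars.slice_eq_listSlice, PySem.Chars.slice_eq_listSlice,
      PySem.List.slice_to_natCast, PySem.List.slice_from_natCast, htake,
      drop_length_takeWhile, splitOnMax_one_head, replace_del]
  · have hfind : PySem.Chars.find e.toList ['@'] = -1 := by
      rw [find_single]; simp [hm]
    have htw : e.toList.takeWhile (· ≠ '@') = e.toList :=
      List.takeWhile_eq_self_iff.mpr (by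
        intro x hx
        simp only [decide_eq_true_eq]
        rintro rfl; exact hm hx)
    have hdw : e.toList.dropWhile (· ≠ '@') = [] := by
      rw [← drop_length_takeWhile, htw, List.drop_length]
    rw [hfind, if_pos rfl,
      show PySem.Chars.len e.toList = ((e.toList.length : Nat) : Int) from by
        simp [PySem.Chars.len],
      PySem.Chars.slice_eq_listSlice, PySem.Chars.slice_eq_listSlice,
      PySem.List.slice_to_natCast, PySem.List.slice_from_natCast,
      List.take_length, List.drop_length, splitOnMax_one_head, replace_del, htw, hdw]

-- ===== VERDICT (by name: the statement is the Claim_ definition above) =====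
theorem num_unique_email_spec : Claim_equal_num_unique_email := by
  intro emails _
  unfold Spec_num_unique_email num_unique_email num_unique_email_alt
  simp only [canon_eq]
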